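-- pv_equiv track=rewrite | github.com/LeoMira-1999/Projet_Python | cluster_function.py | cluster_species_redundance_remover
-- ===== SOURCE A (Python) =====
-- def cluster_species_redundance_remover(cluster_AC, cluster_SP):
--     """
--     Arguments: takes the clusters with accession code and the same list of clusters but with species instead
--     Returns: a non redundant list of clusters AC and SP but redundant species from the species cluster have been removed from both lists
--     Author: Mirandola Leonardo
--     """
--
--     #set 2 empty lists
--     nr_AC = []
--     nr_SP = []
--
--     #cycle in species cluster and with the index
--     for counter_cluster, cluster in enumerate(cluster_SP):
--
--         #set 2 temporary lists
--         temporary_cluster_SP = []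
--         temporary_cluster_AC = []
--
--         #cycle in each clusters and with the index
--         for counter_SP, SP in enumerate(cluster):
--
--             #if the species is not in the temporary list
--             if SP not in temporary_cluster_SP:
--
--                 #append SP
--                 temporary_cluster_SP.append(SP)
--                 #append the AC from the cluster index and the general cluster index
--                 temporary_cluster_AC.append(cluster_AC[counter_cluster][counter_SP])
--
--         #append the non redundant clusters
--         nr_AC.append(temporary_cluster_AC)
--         nr_SP.append(temporary_cluster_SP)
--
--     #return the non redundant list of accession and species
--     return nr_AC, nr_SP
-- ===== SOURCE B (Python) =====
-- def cluster_species_redundance_remover(cluster_AC, cluster_SP):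
--     """Stateless staged pipeline: first compute, per cluster, the list of kept
--     positions (j is kept iff it is the first index of its species, tested with
--     cluster.index(sp) == j -- no seen-accumulator at all), then project those
--     positions through cluster_SP and cluster_AC in two separate passes."""
--     keep_sets = [[j for j, sp in enumerate(cluster) if cluster.index(sp) == j]
--                  for cluster in cluster_SP]
--     nr_SP = [[cluster_SP[i][j] for j in keep] for i, keep in enumerate(keep_sets)]
--     nr_AC = [[cluster_AC[i][j] for j in keep] for i, keep in enumerate(keep_sets)]
--     return nr_AC, nr_SP
-- ===== Notes on version B (the rewrite author's own statement) =====
-- stated objective: alternative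
-- what changed: Replaces A's single stateful pass (growing seen/accumulator lists with an explicit membership branch) by a stateless three-stage pipeline: a positional filter keeps index j iff cluster.index(sp) == j, after which the species and accession rows are produced by two independent projection passes over the kept index sets.
import Mathlib
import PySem

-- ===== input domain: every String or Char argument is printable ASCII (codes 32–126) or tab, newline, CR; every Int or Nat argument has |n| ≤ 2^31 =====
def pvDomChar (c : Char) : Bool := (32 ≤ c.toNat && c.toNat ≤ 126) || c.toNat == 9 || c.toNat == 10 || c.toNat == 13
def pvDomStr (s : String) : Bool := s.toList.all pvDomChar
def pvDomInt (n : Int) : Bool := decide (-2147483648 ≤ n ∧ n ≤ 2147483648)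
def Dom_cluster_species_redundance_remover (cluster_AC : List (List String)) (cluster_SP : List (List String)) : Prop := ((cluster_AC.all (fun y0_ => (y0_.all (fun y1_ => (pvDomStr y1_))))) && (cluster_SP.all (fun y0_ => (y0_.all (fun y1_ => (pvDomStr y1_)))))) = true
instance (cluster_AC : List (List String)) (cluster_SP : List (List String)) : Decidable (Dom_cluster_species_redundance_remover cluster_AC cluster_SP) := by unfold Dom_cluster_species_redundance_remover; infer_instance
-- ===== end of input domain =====

-- B replaces A's single stateful seen-list pass by a stateless staged pipeline: a positional
-- filter (keep index j iff cluster.index(sp) == j) followed by two independent projection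
-- passes building the species and accession rows (objective: alternative, same cost).


-- ===== PORT A =====
-- Literal port of A. The indexing cluster_AC[i][j] is ported with pyGetD with a dummy
-- default; Pre_ excludes exactly the inputs where Python's A would raise IndexError there.
def cluster_species_redundance_remover (cluster_AC : List (List String)) (cluster_SP : List (List String)) : List (List String) × List (List String) :=
  (PySem.List.enumerate cluster_SP 0).foldl
    (fun (nr : List (List String) × List (List String)) p =>
      let t := (PySem.List.enumerate p.2 0).foldl
        (fun (t : List String × List String) q =>
          if q.2 ∈ t.1 then t
          else (t.1 ++ [q.2],
                t.2 ++ [PySem.List.pyGetD (PySem.List.pyGetD cluster_AC p.1 []) q.1 ""]))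
        ([], [])
      (nr.1 ++ [t.2], nr.2 ++ [t.1]))
    ([], [])

-- ===== PORT B =====
-- Literal port of B: per cluster the stateless positional filter (cluster.index(sp) == j,
-- via PySem.List.index?, whose Nat result is cast to Int for the comparison), then two
-- independent projection passes over the kept index sets.
def cluster_species_redundance_remover_alt (cluster_AC : List (List String)) (cluster_SP : List (List String)) : List (List String) × List (List String) :=
  let keep_sets := cluster_SP.map (fun cluster =>
    ((PySem.List.enumerate cluster 0).filter
      (fun q => (PySem.List.index? cluster q.2).map Int.ofNat == some q.1)).map (·.1))
  let nr_SP := (PySem.List.enumerate keep_sets 0).map (fun p =>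
    p.2.map (fun j => PySem.List.pyGetD (PySem.List.pyGetD cluster_SP p.1 []) j ""))
  let nr_AC := (PySem.List.enumerate keep_sets 0).map (fun p =>
    p.2.map (fun j => PySem.List.pyGetD (PySem.List.pyGetD cluster_AC p.1 []) j ""))
  (nr_AC, nr_SP)

-- ===== PRECONDITION & SPEC =====
-- Pre_ holds exactly when every first occurrence of a species lies inside cluster_AC's
-- nesting — i.e. exactly where Python's A (and B) returns instead of raising IndexError.
def Pre_cluster_species_redundance_remover (cluster_AC : List (List String)) (cluster_SP : List (List String)) : Prop :=
  ∀ i < cluster_SP.length, ∀ j < (cluster_SP.getD i []).length,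
    (cluster_SP.getD i []).getD j "" ∉ (cluster_SP.getD i []).take j →
      i < cluster_AC.length ∧ j < (cluster_AC.getD i []).length
instance (cluster_AC : List (List String)) (cluster_SP : List (List String)) : Decidable (Pre_cluster_species_redundance_remover cluster_AC cluster_SP) := by unfold Pre_cluster_species_redundance_remover; infer_instance
def pvWitness_cluster_species_redundance_remover : List (List String) × List (List String) :=
  ([["AC1", "AC2", "AC3"], ["AC4"]], [["sp a", "sp b", "sp a"], ["sp c"]])

def Spec_cluster_species_redundance_remover (cluster_AC : List (List String)) (cluster_SP : List (List String)) (out : List (List String) × List (List String)) : Prop := out = cluster_species_redundance_remover_alt cluster_AC cluster_SP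
instance (cluster_AC : List (List String)) (cluster_SP : List (List String)) (out : List (List String) × List (List String)) : Decidable (Spec_cluster_species_redundance_remover cluster_AC cluster_SP out) := by unfold Spec_cluster_species_redundance_remover; infer_instance

-- ===== CLAIM (what is proved, stated in full; the proofs are below) =====
def Claim_equal_cluster_species_redundance_remover : Prop := ∀ (cluster_AC : List (List String)) (cluster_SP : List (List String)), Dom_cluster_species_redundance_remover cluster_AC cluster_SP → Pre_cluster_species_redundance_remover cluster_AC cluster_SP → Spec_cluster_species_redundance_remover cluster_AC cluster_SP (cluster_species_redundance_remover cluster_AC cluster_SP)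

-- ===== LEMMAS AND PROOFS =====

-- j-th element test: index? l (l[s]) = some s  iff  l[s] does not occur before s.
theorem pv_index_first (l : List String) (s : Nat) (hs : s < l.length) (x : String)
    (hx : l[s] = x) : (PySem.List.index? l x = some s ↔ x ∉ l.take s) := by
  constructor
  · intro h hm
    obtain ⟨pre, suf, hl, hlen, hnot⟩ := (PySem.List.index?_eq_some_iff l x s).1 h
    have hpre : l.take s = pre := by subst hlen; rw [hl]; simp
    exact hnot (hpre ▸ hm)
  · intro hnm
    refine (PySem.List.index?_eq_some_iff l x s).2 ⟨l.take s, l.drop (s+1), ?_, by simp [hs.le], hnm⟩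
    have hcd : l[s] :: l.drop (s+1) = l.drop s := List.getElem_cons_drop hs
    rw [hx] at hcd
    rw [hcd, List.take_append_drop]

-- Per-cluster core: A's seen-list fold over the suffix l.drop s, started with any seen list
-- membership-equivalent to l.take s, appends exactly B's kept-index projections.
theorem pv_inner (l : List String) (f : Int → String) :
    ∀ (xs : List String) (s : Nat) (seen T : List String), l.drop s = xs →
    (∀ y, y ∈ seen ↔ y ∈ l.take s) →
    (PySem.List.enumerate xs (s : Int)).foldl
        (fun (t : List String × List String) q =>
          if q.2 ∈ t.1 then t else (t.1 ++ [q.2], t.2 ++ [f q.1]))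
        (seen, T)
      = (seen ++ (((PySem.List.enumerate xs (s : Int)).filter
            (fun q => (PySem.List.index? l q.2).map Int.ofNat == some q.1)).map (·.1)).map
              (fun j => PySem.List.pyGetD l j ""),
         T ++ (((PySem.List.enumerate xs (s : Int)).filter
            (fun q => (PySem.List.index? l q.2).map Int.ofNat == some q.1)).map (·.1)).map f) := by
  intro xs
  induction xs with
  | nil => intro s seen T _ _; simp [PySem.List.enumerate_nil]
  | cons x xt ih =>
    intro s seen T hdrop hinv
    have hs : s < l.length := by
      by_contra h
      rw [List.drop_eq_nil_of_le (by omega)] at hdrop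
      simp at hdrop
    have hsx : l[s]? = some x := by
      have := congrArg (fun t => t[0]?) hdrop
      simpa using this
    have hx : l[s] = x := by
      rw [List.getElem?_eq_getElem hs] at hsx
      exact Option.some.inj hsx
    have hdrop' : l.drop (s+1) = xt := by
      have hcd : l[s] :: l.drop (s+1) = l.drop s := List.getElem_cons_drop hs
      rw [hdrop, hx] at hcd
      exact (List.cons_inj_right x).1 hcd
    have htake : l.take (s+1) = l.take s ++ [x] := by
      rw [List.take_succ]
      simp [hs, hx]
    have hxl : x ∈ l := hx ▸ l.getElem_mem hs
    have h1 : PySem.List.index? l x = some s ↔ x ∉ l.take s := by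
      exact pv_index_first l s hs x hx
    have hcast : ((s : Int) + 1) = ((s + 1 : Nat) : Int) := by push_cast; ring
    by_cases hmem : x ∈ seen
    · have hc : ((PySem.List.index? l x).map Int.ofNat == some (s : Int)) = false := by
        rcases hidx : PySem.List.index? l x with _ | k
        · exact absurd ((PySem.List.index?_eq_none_iff l x).1 hidx) (by simp [hxl])
        · have hks : k ≠ s := by
            intro he; subst he
            exact (h1.1 hidx) ((hinv x).1 hmem)
          simp only [Option.map_some, beq_eq_false_iff_ne, ne_eq, Option.some.injEq]
          exact fun he => hks (by rw [Int.ofNat_eq_natCast] at he; exact_mod_cast he)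
      rw [PySem.List.enumerate_cons, List.filter_cons_of_neg (by simpa using hc)]
      simp only [List.foldl_cons, if_pos hmem]
      rw [hcast]
      exact ih (s+1) seen T hdrop' (by
        intro y
        rw [htake]
        constructor
        · intro hy; exact List.mem_append_left _ ((hinv y).1 hy)
        · intro hy
          rcases List.mem_append.1 hy with h | h
          · exact (hinv y).2 h
          · simp only [List.mem_singleton] at h; subst h; exact hmem)
    · have hnt : x ∉ l.take s := fun ht => hmem ((hinv x).2 ht)
      have hc : ((PySem.List.index? l x).map Int.ofNat == some (s : Int)) = true := by
        rw [h1.2 hnt]; simp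
      rw [PySem.List.enumerate_cons, List.filter_cons_of_pos (by simpa using hc)]
      simp only [List.foldl_cons, if_neg hmem]
      rw [hcast]
      rw [ih (s+1) (seen ++ [x]) (T ++ [f (s : Int)]) hdrop' (by
        intro y; rw [htake]; simp [hinv y])]
      have hget : PySem.List.pyGetD l (s : Int) "" = x := by
        simp [PySem.List.pyGetD_natCast, List.getD_eq_getElem?_getD, hs, hx]
      simp [hget]

-- Outer fold over pair-appends is a pair of maps.
theorem pv_pair_fold {α β : Type} (l : List α) (f g : α → List β) (a b : List (List β)) :
    l.foldl (fun acc x => (acc.1 ++ [f x], acc.2 ++ [g x])) (a, b)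
      = (a ++ l.map f, b ++ l.map g) := by
  induction l generalizing a b with
  | nil => simp
  | cons x xs ih => simp [ih]

-- enumerate of a mapped list.
theorem pv_enumerate_map {α β : Type} (f : α → β) (l : List α) (s : Int) :
    PySem.List.enumerate (l.map f) s = (PySem.List.enumerate l s).map (fun p => (p.1, f p.2)) := by
  induction l generalizing s with
  | nil => simp [PySem.List.enumerate_nil]
  | cons x xs ih => simp [PySem.List.enumerate_cons, ih]

-- Elements of enumerate cluster_SP 0 index back into cluster_SP.
theorem pv_enum_get (l : List (List String)) (p : Int × List String)
    (hp : p ∈ PySem.List.enumerate l 0) :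
    PySem.List.pyGetD l p.1 [] = p.2 := by
  obtain ⟨k, hk, hpe⟩ := (PySem.List.mem_enumerate_iff l 0 p).1 hp
  subst hpe
  simp [PySem.List.pyGetD_natCast, List.getD_eq_getElem?_getD, hk]

-- ===== VERDICT (by name: the statement is the Claim_ definition above) =====
theorem cluster_species_redundance_remover_spec : Claim_equal_cluster_species_redundance_remover := by
  intro cluster_AC cluster_SP _ _
  unfold Spec_cluster_species_redundance_remover
  unfold cluster_species_redundance_remover cluster_species_redundance_remover_alt
  simp only
  have hA : ∀ (p : Int × List String),
      (PySem.List.enumerate p.2 0).foldl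
        (fun (t : List String × List String) q =>
          if q.2 ∈ t.1 then t
          else (t.1 ++ [q.2],
                t.2 ++ [PySem.List.pyGetD (PySem.List.pyGetD cluster_AC p.1 []) q.1 ""]))
        ([], [])
      = ((((PySem.List.enumerate p.2 0).filter
            (fun q => (PySem.List.index? p.2 q.2).map Int.ofNat == some q.1)).map (·.1)).map
              (fun j => PySem.List.pyGetD p.2 j ""),
         (((PySem.List.enumerate p.2 0).filter
            (fun q => (PySem.List.index? p.2 q.2).map Int.ofNat == some q.1)).map (·.1)).map
              (fun j => PySem.List.pyGetD (PySem.List.pyGetD cluster_AC p.1 []) j "")) := by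
    intro p
    have := pv_inner p.2 (fun j => PySem.List.pyGetD (PySem.List.pyGetD cluster_AC p.1 []) j "")
        p.2 0 [] [] (by simp) (by simp)
    simpa using this
  have hstep :
      (fun (nr : List (List String) × List (List String)) (p : Int × List String) =>
        let t := (PySem.List.enumerate p.2 0).foldl
          (fun (t : List String × List String) q =>
            if q.2 ∈ t.1 then t
            else (t.1 ++ [q.2],
                  t.2 ++ [PySem.List.pyGetD (PySem.List.pyGetD cluster_AC p.1 []) q.1 ""]))
          ([], [])
        (nr.1 ++ [t.2], nr.2 ++ [t.1]))
      = (fun (nr : List (List String) × List (List String)) (p : Int × List String) =>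
        (nr.1 ++ [((((PySem.List.enumerate p.2 0).filter
              (fun q => (PySem.List.index? p.2 q.2).map Int.ofNat == some q.1)).map (·.1)).map
                (fun j => PySem.List.pyGetD (PySem.List.pyGetD cluster_AC p.1 []) j ""))],
         nr.2 ++ [((((PySem.List.enumerate p.2 0).filter
              (fun q => (PySem.List.index? p.2 q.2).map Int.ofNat == some q.1)).map (·.1)).map
                (fun j => PySem.List.pyGetD p.2 j ""))])) := by
    funext nr p
    rw [hA p]
  rw [hstep, pv_pair_fold, pv_enumerate_map]
  simp only [List.nil_append, List.map_map, Prod.mk.injEq]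
  refine ⟨List.map_congr_left (fun p hp => ?_), List.map_congr_left (fun p hp => ?_)⟩
  · simp [Function.comp]
  · simp [Function.comp, pv_enum_get cluster_SP p hp]
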